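-- pv_equiv track=rewrite | github.com/farodoc/Algorithms-and-Data-Structures-AGH-UST | Graph algorithms/przekazywanie_wiadomosci.py | messages
-- ===== SOURCE A (Python) =====
-- from collections import deque
--
-- def messages(G, s):
--     n = len(G)
--     q = deque()
--     visited = [False] * n
--     visited[s] = True
--
--     max_people = max_day = 0
--     day = 1
--     prev_people = 1
--     q.append(s)
--
--     while q:
--         people_cnt = 0
--         for _ in range(prev_people):
--             u = q.popleft()
--             for v in G[u]:
--                 if not visited[v]:
--                     visited[v] = True
--                     q.append(v)
--                     people_cnt += 1
--
--         if people_cnt > max_people: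
--             max_people = people_cnt
--             max_day = day
--
--         prev_people = people_cnt
--         day += 1
--
--     return max_day, max_people
-- ===== SOURCE B (Python) =====
-- from collections import Counter
--
-- def messages(G, s):
--     n = len(G)
--     # Phase 1: plain single-node BFS computing each reached vertex's distance from s.
--     dist = [-1] * n
--     dist[s] = 0
--     q = [s]
--     head = 0
--     while head < len(q):
--         u = q[head]
--         head += 1
--         du = dist[u]
--         for v in G[u]:
--             if dist[v] == -1:
--                 dist[v] = du + 1
--                 q.append(v)
--     # Phase 2: histogram of distances, then scan days for the earliest strict maximum.
--     hist = Counter(dist)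
--     best_day = best_cnt = 0
--     for day in range(1, n):
--         c = hist[day]
--         if c > best_cnt:
--             best_cnt = c
--             best_day = day
--     return best_day, best_cnt
-- ===== Notes on version B (the rewrite author's own statement) =====
-- stated objective: alternative
-- what changed: A runs a level-synchronized deque BFS (prev_people counter delimits each day's frontier) and updates the running maximum inside the traversal loop; B instead runs a plain node-at-a-time BFS that records each vertex's distance in a dist array, then builds a Counter histogram of those distances and scans days 1..n-1 for the earliest strictly-largest count.
-- outside the precondition, e.g. on messages([[], [5]], 0): A returns (0, 0), B returns (0, 0)
import Mathlib
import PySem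

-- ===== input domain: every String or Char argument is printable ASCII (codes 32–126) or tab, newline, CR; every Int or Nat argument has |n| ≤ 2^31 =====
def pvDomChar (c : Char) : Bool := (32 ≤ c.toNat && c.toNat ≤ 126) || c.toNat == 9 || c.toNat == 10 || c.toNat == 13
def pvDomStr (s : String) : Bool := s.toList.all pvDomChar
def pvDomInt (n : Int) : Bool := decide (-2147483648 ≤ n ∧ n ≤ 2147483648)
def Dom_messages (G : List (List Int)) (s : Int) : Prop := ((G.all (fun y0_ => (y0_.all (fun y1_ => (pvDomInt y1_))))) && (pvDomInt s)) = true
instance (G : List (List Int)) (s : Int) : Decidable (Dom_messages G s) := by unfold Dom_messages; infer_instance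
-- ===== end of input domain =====

-- B replaces A's level-synchronized deque BFS (with its prev_people level counter and online
-- maximum) by a node-at-a-time BFS filling a distance array, followed by a Counter histogram
-- of the distances and a separate scan of days 1..n-1 for the earliest strict maximum.

-- ===== PORT A =====
-- inner 'for v in G[u]': pop-target queue gets appends at the back, visited is flipped, people_cnt counted
def pvRowA : List Int → List Int → List Bool → Int → List Int × List Bool × Int
  | [], q, visited, cnt => (q, visited, cnt)
  | v :: vs, q, visited, cnt =>
    if PySem.List.pyGetD visited v true = false then
      pvRowA vs (q ++ [v]) (PySem.List.pySetD visited v true) (cnt + 1)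
    else
      pvRowA vs q visited cnt

-- 'for _ in range(prev_people): u = q.popleft(); …' (popleft of an empty deque cannot occur under Pre_)
def pvInnerA (G : List (List Int)) : Nat → List Int → List Bool → Int → List Int × List Bool × Int
  | 0, q, visited, cnt => (q, visited, cnt)
  | k + 1, q, visited, cnt =>
    match q with
    | [] => (q, visited, cnt)
    | u :: rest =>
      let r := pvRowA (PySem.List.pyGetD G u []) rest visited cnt
      pvInnerA G k r.1 r.2.1 r.2.2

-- 'while q: …' ported with a fuel guard (the Python loop runs at most len(G) times)
def pvLoopA (G : List (List Int)) : Nat → List Int → List Bool → Int → Int → Int → Int → Int × Int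
  | 0, _, _, maxPeople, maxDay, _, _ => (maxDay, maxPeople)
  | fuel + 1, q, visited, maxPeople, maxDay, day, prevPeople =>
    if q.isEmpty then (maxDay, maxPeople)
    else
      let r := pvInnerA G prevPeople.toNat q visited 0
      let mp := if r.2.2 > maxPeople then r.2.2 else maxPeople
      let md := if r.2.2 > maxPeople then day else maxDay
      pvLoopA G fuel r.1 r.2.1 mp md (day + 1) r.2.2

def messages (G : List (List Int)) (s : Int) : Int × Int :=
  let n := G.length
  let visited := PySem.List.pySetD (List.replicate n false) s true
  pvLoopA G (n + 1) [s] visited 0 0 1 1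

-- ===== PORT B =====
-- 'for v in G[u]: if dist[v] == -1: dist[v] = du + 1; q.append(v)'
def pvRowB (du : Int) : List Int → List Int → List Int → List Int × List Int
  | [], q, dist => (q, dist)
  | v :: vs, q, dist =>
    if PySem.List.pyGetD dist v 0 = -1 then
      pvRowB du vs (q ++ [v]) (PySem.List.pySetD dist v (du + 1))
    else
      pvRowB du vs q dist

-- 'while head < len(q): u = q[head]; head += 1; …' — the unread suffix of q is the state;
-- ported with a fuel guard (each vertex is enqueued at most once, so at most len(G) pops)
def pvBfsB (G : List (List Int)) : Nat → List Int → List Int → List Int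
  | 0, _, dist => dist
  | fuel + 1, q, dist =>
    match q with
    | [] => dist
    | u :: rest =>
      let du := PySem.List.pyGetD dist u 0
      let r := pvRowB du (PySem.List.pyGetD G u []) rest dist
      pvBfsB G fuel r.1 r.2

-- 'for day in range(1, n): c = hist[day]; if c > best_cnt: …'
def pvScanB (hist : PySem.Dict Int Int) : List Int → Int → Int → Int × Int
  | [], bestDay, bestCnt => (bestDay, bestCnt)
  | day :: days, bestDay, bestCnt =>
    let c := hist.getD day 0
    if c > bestCnt then pvScanB hist days day c
    else pvScanB hist days bestDay bestCnt

def messages_alt (G : List (List Int)) (s : Int) : Int × Int :=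
  let n := G.length
  let dist := pvBfsB G n [s] (PySem.List.pySetD (List.replicate n (-1)) s 0)
  pvScanB (PySem.Dict.counter dist) (PySem.List.pyRange 1 (n : Int) 1) 0 0

-- ===== PRECONDITION & SPEC =====
-- Pre_ requires s and every neighbour label to be a valid Python index into G (-len ≤ x < len):
-- A raises IndexError the moment it dereferences an out-of-range label; labels sitting on rows
-- BFS never reaches are excluded too, because reachability is not a closed-form condition.
def Pre_messages (G : List (List Int)) (s : Int) : Prop :=
  -((G.length : Int)) ≤ s ∧ s < (G.length : Int) ∧
    ∀ row ∈ G, ∀ v ∈ row, -((G.length : Int)) ≤ v ∧ v < (G.length : Int)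
instance (G : List (List Int)) (s : Int) : Decidable (Pre_messages G s) := by
  unfold Pre_messages; infer_instance

def pvWitness_messages : List (List Int) × Int := ([[1], [0]], 0)

def Spec_messages (G : List (List Int)) (s : Int) (out : Int × Int) : Prop := out = messages_alt G s
instance (G : List (List Int)) (s : Int) (out : Int × Int) : Decidable (Spec_messages G s out) := by
  unfold Spec_messages; infer_instance

-- ===== CLAIM (what is proved, stated in full; the proofs are below) =====
def Claim_equal_messages : Prop :=
  ∀ (G : List (List Int)) (s : Int), Dom_messages G s → Pre_messages G s →
    Spec_messages G s (messages G s)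

-- ===== LEMMAS AND PROOFS =====

-- visited[i] in A is exactly 'dist[i] ≠ -1' in B
def pvF (d : Int) : Bool := !(d == -1)

lemma pvF_eq_false {d : Int} : pvF d = false ↔ d = -1 := by simp [pvF]

lemma pyGetD_mapF (dist : List Int) (v : Int) :
    PySem.List.pyGetD (dist.map pvF) v true = pvF (PySem.List.pyGetD dist v 0) := by
  have h := PySem.List.pyGetD_map pvF dist v 0
  simpa [pvF] using h

lemma pyIdx?_of_inRange {n : Nat} {i : Int} (h : PySem.Raise.InRange n i) :
    ∃ j : Nat, PySem.List.pyIdx? n i = some j ∧ j < n := by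
  obtain ⟨h1, h2⟩ := h
  unfold PySem.List.pyIdx?
  by_cases ha : 0 ≤ i
  · rw [if_pos ha, if_pos h2]
    exact ⟨i.toNat, rfl, by omega⟩
  · rw [if_neg ha, if_pos h1]
    exact ⟨n - (-i).toNat, rfl, by omega⟩

lemma pySetD_eq_set {α : Type} (xs : List α) (i : Int) (v : α) (j : Nat)
    (hj : PySem.List.pyIdx? xs.length i = some j) :
    PySem.List.pySetD xs i v = xs.set j v := by
  unfold PySem.List.pySetD PySem.List.pySet?
  rw [hj]; rfl

lemma pyGetD_eq_getElem' {α : Type} (xs : List α) (i : Int) (d : α) (j : Nat)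
    (hj : PySem.List.pyIdx? xs.length i = some j) (hjl : j < xs.length) :
    PySem.List.pyGetD xs i d = xs[j] := by
  unfold PySem.List.pyGetD PySem.List.pyGet?
  rw [hj]
  simp [List.getElem?_eq_getElem hjl]

lemma pyGetD_of_idx_none {α : Type} (xs : List α) (i : Int) (d : α)
    (h : PySem.List.pyIdx? xs.length i = none) :
    PySem.List.pyGetD xs i d = d := by
  unfold PySem.List.pyGetD PySem.List.pyGet?
  rw [h]; rfl

lemma pyIdx?_lt {n k : Nat} {i : Int} (h : PySem.List.pyIdx? n i = some k) : k < n := by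
  unfold PySem.List.pyIdx? at h
  split_ifs at h with ha hb hc <;> injection h with h' <;> omega

-- mapping pvF commutes with a store
lemma map_pvF_pySetD (dist : List Int) (v x : Int) (hx : x ≠ -1) :
    (PySem.List.pySetD dist v x).map pvF = PySem.List.pySetD (dist.map pvF) v true := by
  unfold PySem.List.pySetD PySem.List.pySet?
  rcases h : PySem.List.pyIdx? dist.length v with _ | j
  · simp [h]
  · have h' : PySem.List.pyIdx? (dist.map pvF).length v = some j := by simpa using h
    simp only [h', Option.map_some, Option.getD_some, List.map_set]
    congr 1
    simp [pvF, hx]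

-- value read back at the stored cell
lemma pyGetD_pySetD_self (dist : List Int) {v : Int} (x : Int)
    (hv : PySem.Raise.InRange dist.length v) :
    PySem.List.pyGetD (PySem.List.pySetD dist v x) v 0 = x := by
  obtain ⟨j, hj, hjl⟩ := pyIdx?_of_inRange hv
  rw [pySetD_eq_set dist v x j hj]
  rw [pyGetD_eq_getElem' _ v 0 j (by simpa using hj) (by simpa using hjl)]
  simp [List.getElem_set_self]

-- a store into a (-1)-cell does not change any already-assigned reading
lemma pyGetD_pySetD_other (dist : List Int) {v : Int} (x w : Int)
    (hv : PySem.Raise.InRange dist.length v)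
    (hold : PySem.List.pyGetD dist v 0 = -1)
    (hw : PySem.List.pyGetD dist w 0 ≠ -1) :
    PySem.List.pyGetD (PySem.List.pySetD dist v x) w 0 = PySem.List.pyGetD dist w 0 := by
  obtain ⟨j, hj, hjl⟩ := pyIdx?_of_inRange hv
  rw [pySetD_eq_set dist v x j hj]
  have hjv : dist[j] = -1 := by
    rw [pyGetD_eq_getElem' dist v 0 j hj hjl] at hold; exact hold
  rcases hw' : PySem.List.pyIdx? dist.length w with _ | k
  · rw [pyGetD_of_idx_none _ w 0 (by simpa using hw'),
        pyGetD_of_idx_none _ w 0 hw']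
  · have hkl : k < dist.length := pyIdx?_lt hw'
    rw [pyGetD_eq_getElem' _ w 0 k (by simpa using hw') (by simpa using hkl),
        pyGetD_eq_getElem' dist w 0 k hw' hkl]
    rw [List.getElem_set]
    split_ifs with hjk
    · exfalso
      apply hw
      rw [pyGetD_eq_getElem' dist w 0 k hw' hkl]
      subst hjk
      exact hjv
    · rfl

-- counting through a store into a (-1)-cell
lemma count_pySetD (dist : List Int) {v : Int} (x : Int)
    (hv : PySem.Raise.InRange dist.length v)
    (hold : PySem.List.pyGetD dist v 0 = -1) (m : Int) :
    ((PySem.List.pySetD dist v x).count m : Int)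
      = (dist.count m : Int) - (if m = -1 then 1 else 0) + (if m = x then 1 else 0) := by
  obtain ⟨j, hj, hjl⟩ := pyIdx?_of_inRange hv
  rw [pySetD_eq_set dist v x j hj]
  have hjv : dist[j] = -1 := by
    rw [pyGetD_eq_getElem' dist v 0 j hj hjl] at hold; exact hold
  have hcnt := List.count_set (a := x) (b := m) (l := dist) (i := j) hjl
  simp only [beq_iff_eq, hjv] at hcnt
  rw [hcnt]
  have hmem : dist[j] ∈ dist := List.getElem_mem hjl
  have hpos : m = -1 → 0 < dist.count m := fun hm =>
    List.count_pos_iff.mpr (by rw [hm, ← hjv]; exact hmem)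
  by_cases hm1 : m = -1
  · rw [if_pos hm1.symm, if_pos hm1]
    by_cases hx : m = x
    · rw [if_pos hx.symm, if_pos hx]
      have := hpos hm1; omega
    · rw [if_neg (fun h => hx h.symm), if_neg hx]
      have := hpos hm1; omega
  · rw [if_neg (fun h => hm1 h.symm), if_neg hm1]
    by_cases hx : m = x
    · rw [if_pos hx.symm, if_pos hx]; omega
    · rw [if_neg (fun h => hx h.symm), if_neg hx]; omega

-- ---- pops decomposition of B's BFS loop ----

-- the state (unread queue suffix, dist) after a given number of pops of B's loop
def pvPops (G : List (List Int)) : Nat → List Int → List Int → List Int × List Int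
  | 0, q, dist => (q, dist)
  | k + 1, q, dist =>
    match q with
    | [] => ([], dist)
    | u :: rest =>
      let du := PySem.List.pyGetD dist u 0
      let r := pvRowB du (PySem.List.pyGetD G u []) rest dist
      pvPops G k r.1 r.2

lemma pvBfsB_nil (G : List (List Int)) : ∀ fuel dist, pvBfsB G fuel [] dist = dist := by
  intro fuel dist; cases fuel <;> rfl

lemma pvBfsB_split (G : List (List Int)) :
    ∀ (a b : Nat) (q dist : List Int),
      pvBfsB G (a + b) q dist = pvBfsB G b (pvPops G a q dist).1 (pvPops G a q dist).2 := by
  intro a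
  induction a with
  | zero => intro b q dist; simp [pvPops]
  | succ a ih =>
    intro b q dist
    rw [show a + 1 + b = (a + b) + 1 by omega]
    cases q with
    | nil => simp [pvPops, pvBfsB_nil, pvBfsB]
    | cons u rest =>
      simp only [pvBfsB, pvPops]
      exact ih b _ _

-- ---- the coupled row lemma: one adjacency row, A and B in lockstep ----

lemma pvRow_ab (du : Int) (hdu : 0 ≤ du) (row : List Int) :
    ∀ (dist qa qb : List Int) (cnt : Int),
      (∀ v ∈ row, PySem.Raise.InRange dist.length v) →
      ∃ qN dist',
        pvRowB du row qb dist = (qb ++ qN, dist') ∧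
        pvRowA row qa (dist.map pvF) cnt = (qa ++ qN, dist'.map pvF, cnt + qN.length) ∧
        dist'.length = dist.length ∧
        (∀ w : Int, PySem.List.pyGetD dist w 0 ≠ -1 →
          PySem.List.pyGetD dist' w 0 = PySem.List.pyGetD dist w 0) ∧
        (∀ u ∈ qN, PySem.Raise.InRange dist.length u ∧ PySem.List.pyGetD dist' u 0 = du + 1) ∧
        (∀ d ∈ dist', d ∈ dist ∨ d = du + 1) ∧
        (∀ m : Int, m ≠ -1 →
          (dist'.count m : Int) = dist.count m + (if m = du + 1 then (qN.length : Int) else 0)) ∧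
        ((dist.count (-1) : Int) = dist'.count (-1) + qN.length) ∧
        (qN = [] → dist' = dist) := by
  induction row with
  | nil =>
    intro dist qa qb cnt _
    exact ⟨[], dist, by simp [pvRowB], by simp [pvRowA], rfl, fun _ _ => rfl,
      by simp, fun d hd => Or.inl hd, by intro m _; simp, by simp, fun _ => rfl⟩
  | cons v vs ih =>
    intro dist qa qb cnt hrow
    have hv : PySem.Raise.InRange dist.length v := hrow v (by simp)
    by_cases hfresh : PySem.List.pyGetD dist v 0 = -1
    · -- fresh vertex: both sides mark it and append it
      set dist₁ := PySem.List.pySetD dist v (du + 1) with hd1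
      have hlen1 : dist₁.length = dist.length := PySem.List.length_pySetD dist v (du + 1)
      obtain ⟨qN, dist', hB, hA, hlen, hpres, hqn, hmem, hcnt, hcnt1, hemp⟩ :=
        ih dist₁ (qa ++ [v]) (qb ++ [v]) (cnt + 1)
          (fun w hw => by rw [hlen1]; exact hrow w (by simp [hw]))
      have hself : PySem.List.pyGetD dist₁ v 0 = du + 1 := pyGetD_pySetD_self dist (du + 1) hv
      have hpres1 : ∀ w : Int, PySem.List.pyGetD dist w 0 ≠ -1 →
          PySem.List.pyGetD dist₁ w 0 = PySem.List.pyGetD dist w 0 :=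
        fun w hw => pyGetD_pySetD_other dist (du + 1) w hv hfresh hw
      refine ⟨v :: qN, dist', ?_, ?_, by rw [hlen, hlen1], ?_, ?_, ?_, ?_, ?_, by simp⟩
      · simp only [pvRowB, if_pos hfresh]
        rw [hB]; simp
      · simp only [pvRowA, pyGetD_mapF, pvF_eq_false, if_pos hfresh]
        rw [← map_pvF_pySetD dist v (du + 1) (by omega), ← hd1, hA]
        refine Prod.ext (by simp) (Prod.ext rfl ?_)
        simp only [List.length_cons]
        push_cast
        ring
      · intro w hw
        rw [hpres w (by rw [hpres1 w hw]; exact hw), hpres1 w hw]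
      · intro u hu
        rcases List.mem_cons.mp hu with rfl | hu'
        · refine ⟨hv, ?_⟩
          rw [hpres u (by rw [hself]; omega), hself]
        · have := hqn u hu'
          rw [hlen1] at this
          exact this
      · intro d hd
        rcases hmem d hd with h | h
        · rcases List.mem_or_eq_of_mem_set (by
            rw [hd1, pySetD_eq_set dist v (du + 1)
              (pyIdx?_of_inRange hv).choose (pyIdx?_of_inRange hv).choose_spec.1] at h
            exact h) with h' | h'
          · exact Or.inl h'
          · exact Or.inr h'
        · exact Or.inr h
      · intro m hm
        have e1 := count_pySetD dist (du + 1) hv hfresh m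
        have e2 := hcnt m hm
        rw [← hd1] at e1
        rw [e2, e1]
        rw [if_neg hm]
        by_cases hmx : m = du + 1
        · simp only [hmx, if_pos]
          simp only [List.length_cons]
          push_cast
          omega
        · simp only [if_neg hmx]
          omega
      · have e1 := count_pySetD dist (du + 1) hv hfresh (-1)
        rw [← hd1] at e1
        rw [if_pos rfl, if_neg (by omega)] at e1
        simp only [List.length_cons]
        push_cast
        omega
    · -- already seen: both sides skip
      obtain ⟨qN, dist', hB, hA, hlen, hpres, hqn, hmem, hcnt, hcnt1, hemp⟩ :=
        ih dist qa qb cnt (fun w hw => hrow w (by simp [hw]))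
      refine ⟨qN, dist', ?_, ?_, hlen, hpres, hqn, hmem, hcnt, hcnt1, hemp⟩
      · simp only [pvRowB, if_neg hfresh]; exact hB
      · simp only [pvRowA, pyGetD_mapF, pvF_eq_false, if_neg hfresh]; exact hA

-- ---- the coupled level lemma: one whole BFS level ----

lemma pvLevel (G : List (List Int)) (n : Nat) (hn : G.length = n)
    (hG : ∀ row ∈ G, ∀ v ∈ row, PySem.Raise.InRange n v) (day : Int) (hday : 1 ≤ day) :
    ∀ (pending acc dist : List Int) (cnt : Int),
      dist.length = n →
      (∀ u ∈ pending, PySem.Raise.InRange n u ∧ PySem.List.pyGetD dist u 0 = day - 1) →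
      ∃ qN dist',
        pvPops G pending.length (pending ++ acc) dist = (acc ++ qN, dist') ∧
        pvInnerA G pending.length (pending ++ acc) (dist.map pvF) cnt
          = (acc ++ qN, dist'.map pvF, cnt + qN.length) ∧
        dist'.length = n ∧
        (∀ w : Int, PySem.List.pyGetD dist w 0 ≠ -1 →
          PySem.List.pyGetD dist' w 0 = PySem.List.pyGetD dist w 0) ∧
        (∀ u ∈ qN, PySem.Raise.InRange n u ∧ PySem.List.pyGetD dist' u 0 = day) ∧
        (∀ d ∈ dist', d ∈ dist ∨ d = day) ∧
        (∀ m : Int, m ≠ -1 →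
          (dist'.count m : Int) = dist.count m + (if m = day then (qN.length : Int) else 0)) ∧
        ((dist.count (-1) : Int) = dist'.count (-1) + qN.length) ∧
        (qN = [] → dist' = dist) := by
  intro pending
  induction pending with
  | nil =>
    intro acc dist cnt _ _
    exact ⟨[], dist, by simp [pvPops], by simp [pvInnerA], by assumption, fun _ _ => rfl,
      by simp, fun d hd => Or.inl hd, by intro m _; simp, by simp, fun _ => rfl⟩
  | cons u us ih =>
    intro acc dist cnt hlen hpend
    obtain ⟨hu1, hu2⟩ := hpend u (by simp)
    have hrowmem : PySem.List.pyGetD G u [] ∈ G :=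
      PySem.List.pyGetD_mem G [] (by rw [hn]; exact hu1)
    have hrow : ∀ v ∈ PySem.List.pyGetD G u [], PySem.Raise.InRange dist.length v :=
      fun v hv => by rw [hlen]; exact hG _ hrowmem v hv
    obtain ⟨qN₀, dist₀, hB0, hA0, hlen0, hpres0, hqn0, hmem0, hcnt0, hcnt10, hemp0⟩ :=
      pvRow_ab (day - 1) (by omega) (PySem.List.pyGetD G u []) dist (us ++ acc) (us ++ acc)
        cnt hrow
    have hd1 : day - 1 + 1 = day := by ring
    simp only [hd1] at hqn0 hmem0 hcnt0
    obtain ⟨qN₁, dist', hB1, hA1, hlen', hpres1, hqn1, hmem1, hcnt1, hcnt11, hemp1⟩ :=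
      ih (acc ++ qN₀) dist₀ (cnt + qN₀.length) (hlen0.trans hlen)
        (fun w hw => ⟨(hpend w (by simp [hw])).1, by
          rw [hpres0 w (by rw [(hpend w (by simp [hw])).2]; omega)]
          exact (hpend w (by simp [hw])).2⟩)
    refine ⟨qN₀ ++ qN₁, dist', ?_, ?_, hlen', ?_, ?_, ?_, ?_, ?_, ?_⟩
    · simp only [List.cons_append, List.length_cons, pvPops, hu2, hB0]
      simpa [List.append_assoc] using hB1
    · simp only [List.cons_append, List.length_cons, pvInnerA, hA0]
      simp only [List.append_assoc] at hA1 ⊢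
      rw [hA1]
      refine Prod.ext rfl (Prod.ext rfl ?_)
      simp only [List.length_append]
      push_cast
      ring
    · intro w hw
      rw [hpres1 w (by rw [hpres0 w hw]; exact hw), hpres0 w hw]
    · intro w hw
      rcases List.mem_append.mp hw with h | h
      · have h0 := hqn0 w h
        refine ⟨by rw [← hlen]; exact h0.1, ?_⟩
        rw [hpres1 w (by rw [h0.2]; omega), h0.2]
      · exact hqn1 w h
    · intro d hd
      rcases hmem1 d hd with h | h
      · rcases hmem0 d h with h' | h'
        · exact Or.inl h'
        · exact Or.inr h'
      · exact Or.inr h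
    · intro m hm
      have e0 := hcnt0 m hm
      have e1 := hcnt1 m hm
      rw [e1, e0]
      by_cases hmd : m = day
      · simp only [hmd, if_pos]
        simp only [List.length_append]
        push_cast
        ring
      · simp only [if_neg hmd]
        ring
    · rw [List.length_append]
      push_cast
      omega
    · intro h
      rcases List.append_eq_nil_iff.mp h with ⟨h0, h1⟩
      rw [hemp1 h1, hemp0 h0]

-- later levels never touch counts of already-finished days
lemma pvBfs_count (G : List (List Int)) (n : Nat) (hn : G.length = n)
    (hG : ∀ row ∈ G, ∀ v ∈ row, PySem.Raise.InRange n v) (m : Int) (hm : 1 ≤ m) :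
    ∀ (fuel : Nat) (q dist : List Int),
      dist.length = n →
      (∀ u ∈ q, PySem.Raise.InRange n u ∧ m ≤ PySem.List.pyGetD dist u 0) →
      (pvBfsB G fuel q dist).count m = dist.count m := by
  intro fuel
  induction fuel with
  | zero => intro q dist _ _; rfl
  | succ fuel ih =>
    intro q dist hlen hq
    cases q with
    | nil => rfl
    | cons u rest =>
      obtain ⟨hu1, hu2⟩ := hq u (by simp)
      obtain ⟨qN, dist₀, hB0, _, hlen0, hpres0, hqn0, _, hcnt0, _, _⟩ :=
        pvRow_ab (PySem.List.pyGetD dist u 0) (by omega) (PySem.List.pyGetD G u []) dist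
          rest rest 0
          (fun v hv => by
            rw [hlen]
            exact hG _ (PySem.List.pyGetD_mem G [] (by rw [hn]; exact hu1)) v hv)
      simp only [pvBfsB, hB0]
      have e0 := hcnt0 m (by omega)
      rw [if_neg (by omega)] at e0
      have hrec := ih (rest ++ qN) dist₀ (hlen0.trans hlen) (fun w hw => by
        rcases List.mem_append.mp hw with h | h
        · obtain ⟨h1, h2⟩ := hq w (by simp [h])
          exact ⟨h1, by rw [hpres0 w (by omega)]; omega⟩
        · obtain ⟨h1, h2⟩ := hqn0 w h
          exact ⟨by rw [← hlen]; exact h1, by omega⟩)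
      rw [hrec]
      omega

-- scanning days whose histogram count is zero changes nothing
lemma pvScan_zero (D : List Int) :
    ∀ (days : List Int) (md mp : Int), 0 ≤ mp → (∀ x ∈ days, D.count x = 0) →
      pvScanB (PySem.Dict.counter D) days md mp = (md, mp) := by
  intro days
  induction days with
  | nil => intro md mp _ _; rfl
  | cons d ds ih =>
    intro md mp hmp hz
    simp only [pvScanB, PySem.Dict.getD_counter, hz d (by simp)]
    rw [if_neg (by omega)]
    exact ih md mp hmp (fun x hx => hz x (by simp [hx]))

lemma pvLoopA_nil (G : List (List Int)) :
    ∀ (fuel : Nat) (visited : List Bool) (mp md day pp : Int),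
      pvLoopA G fuel [] visited mp md day pp = (md, mp) := by
  intro fuel visited mp md day pp; cases fuel <;> rfl

-- ---- the main lockstep lemma ----

lemma pvMain (G : List (List Int)) (n : Nat) (hn : G.length = n)
    (hG : ∀ row ∈ G, ∀ v ∈ row, PySem.Raise.InRange n v) :
    ∀ (fuelA : Nat) (fuelB : Nat) (q dist : List Int) (mp md day : Int),
      dist.length = n →
      (∀ u ∈ q, PySem.Raise.InRange n u ∧ PySem.List.pyGetD dist u 0 = day - 1) →
      (∀ d ∈ dist, d ≤ day - 1) →
      (∀ k : Int, 0 ≤ k → k < day → k ∈ dist) →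
      1 ≤ day → 0 ≤ mp →
      (dist.count (-1) : Int) + 2 ≤ (fuelA : Int) →
      (q.length : Int) + (dist.count (-1) : Int) ≤ (fuelB : Int) →
      pvLoopA G fuelA q (dist.map pvF) mp md day (q.length : Int)
        = pvScanB (PySem.Dict.counter (pvBfsB G fuelB q dist))
            (PySem.List.pyRange day (n : Int) 1) md mp := by
  intro fuelA
  induction fuelA with
  | zero =>
    intro fuelB q dist mp md day hlen hq hub hvals hday hmp hfa hfb
    exfalso; omega
  | succ fa ih =>
    intro fuelB q dist mp md day hlen hq hub hvals hday hmp hfa hfb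
    have hzero : ∀ x ∈ PySem.List.pyRange day (n : Int) 1, (∀ d ∈ dist, d ≤ day - 1) →
        dist.count x = 0 := fun x hx h => by
      have hxr := PySem.List.mem_pyRange_one.mp hx
      exact List.count_eq_zero.mpr (fun hm => by have := h x hm; omega)
    by_cases hqe : q = []
    · subst hqe
      rw [pvLoopA_nil, pvBfsB_nil, pvScan_zero dist _ md mp hmp (fun x hx => hzero x hx hub)]
    · simp only [pvLoopA]
      rw [if_neg (by simp [List.isEmpty_iff, hqe])]
      simp only [Int.toNat_natCast]
      obtain ⟨qN, dist', hPops, hInner, hlen', hpres, hqn, hmem, hcnt, hcnt1, hemp⟩ :=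
        pvLevel G n hn hG day hday q [] dist 0 hlen hq
      rw [List.append_nil] at hPops hInner
      simp only [List.nil_append] at hPops hInner
      simp only [hInner, zero_add]
      have hql : q.length ≤ fuelB := by omega
      rw [show fuelB = q.length + (fuelB - q.length) by omega, pvBfsB_split, hPops]
      by_cases hqn0 : qN = []
      · subst hqn0
        rw [hemp rfl] at hpres hqn hmem hcnt hcnt1 ⊢
        simp only [List.length_nil, Nat.cast_zero]
        rw [if_neg (by omega), if_neg (by omega), pvLoopA_nil, pvBfsB_nil,
          pvScan_zero dist _ md mp hmp (fun x hx => hzero x hx hub)]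
      · have hpos : 0 < qN.length := List.length_pos_iff.mpr hqn0
        have hsub : ∀ x : Int, 0 ≤ x → x < day + 1 → x ∈ dist' := by
          intro x hx0 hx1
          by_cases hxd : x = day
          · obtain ⟨u0, hu0⟩ := List.exists_mem_of_ne_nil qN hqn0
            obtain ⟨hu01, hu02⟩ := hqn u0 hu0
            have : PySem.List.pyGetD dist' u0 0 ∈ dist' :=
              PySem.List.pyGetD_mem dist' 0 (by rw [hlen']; exact hu01)
            rw [hu02] at this
            rwa [hxd]
          · have hxd' : x ∈ dist := hvals x hx0 (by omega)
            have h1 : 0 < dist.count x := List.count_pos_iff.mpr hxd'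
            have h2 := hcnt x (by omega)
            apply List.count_pos_iff.mp
            by_cases hxe : x = day
            · exact absurd hxe hxd
            · rw [if_neg hxe] at h2; omega
        have hdn : day < (n : Int) := by
          have hnd := ((PySem.List.nodup_pyRange_one 0 (day + 1)).subperm
            (fun x hx => by
              have := PySem.List.mem_pyRange_one.mp hx
              exact hsub x this.1 this.2)).length_le
          rw [PySem.List.length_pyRange_one, hlen'] at hnd
          omega
        rw [PySem.List.pyRange_one_cons hdn]
        simp only [pvScanB, PySem.Dict.getD_counter]
        have hD : (pvBfsB G (fuelB - q.length) qN dist').count day = dist'.count day :=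
          pvBfs_count G n hn hG day (by omega) _ qN dist' hlen'
            (fun u hu => ⟨(hqn u hu).1, le_of_eq (hqn u hu).2.symm⟩)
        have hcd : (dist'.count day : Int) = qN.length := by
          have h2 := hcnt day (by omega)
          rw [if_pos rfl] at h2
          have h0 : dist.count day = 0 :=
            List.count_eq_zero.mpr (fun hm => by have := hub day hm; omega)
          omega
        rw [hD, hcd]
        have hrec : ∀ mp' md' : Int, 0 ≤ mp' →
            pvLoopA G fa qN (dist'.map pvF) mp' md' (day + 1) (qN.length : Int)
              = pvScanB (PySem.Dict.counter (pvBfsB G (fuelB - q.length) qN dist'))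
                  (PySem.List.pyRange (day + 1) (n : Int) 1) md' mp' := by
          intro mp' md' hmp'
          apply ih (fuelB - q.length) qN dist' mp' md' (day + 1) hlen'
            (fun u hu => ⟨(hqn u hu).1, by rw [(hqn u hu).2]; ring⟩)
            (fun d hd => by rcases hmem d hd with h | h
                            · have := hub d h; omega
                            · omega)
            (fun k hk0 hk1 => hsub k hk0 hk1)
            (by omega) hmp' (by omega) (by omega)
        by_cases hgt : (qN.length : Int) > mp
        · simp only [if_pos hgt]
          exact hrec _ _ (by omega)
        · simp only [if_neg hgt]
          exact hrec _ _ hmp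

-- the top-level wiring of the main lemma
lemma messages_eq (G : List (List Int)) (s : Int) (hpre : Pre_messages G s) :
    messages G s = messages_alt G s := by
  obtain ⟨hs1, hs2, hrows⟩ := hpre
  have hsr : PySem.Raise.InRange G.length s := ⟨hs1, hs2⟩
  have hn1 : 1 ≤ G.length := by
    rcases G with _ | _
    · exfalso; simp at hs1 hs2; omega
    · simp
  obtain ⟨j, hj, hjl⟩ := pyIdx?_of_inRange hsr
  have hrl : (List.replicate G.length (-1 : Int)).length = G.length := List.length_replicate
  have hsr' : PySem.Raise.InRange (List.replicate G.length (-1 : Int)).length s := by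
    rw [hrl]; exact hsr
  have hlen0 : (PySem.List.pySetD (List.replicate G.length (-1 : Int)) s 0).length = G.length := by
    rw [PySem.List.length_pySetD, hrl]
  have hget0 : PySem.List.pyGetD (PySem.List.pySetD (List.replicate G.length (-1 : Int)) s 0) s 0
      = 0 := pyGetD_pySetD_self _ 0 hsr'
  have hold : PySem.List.pyGetD (List.replicate G.length (-1 : Int)) s 0 = -1 := by
    rw [pyGetD_eq_getElem' _ s 0 j (by rw [hrl]; exact hj) (by rw [hrl]; exact hjl)]
    simp
  have hvis : PySem.List.pySetD (List.replicate G.length false) s true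
      = (PySem.List.pySetD (List.replicate G.length (-1 : Int)) s 0).map pvF := by
    have h := map_pvF_pySetD (List.replicate G.length (-1)) s 0 (by omega)
    rw [List.map_replicate, show pvF (-1) = false from rfl] at h
    exact h.symm
  have hcnt0 : ((PySem.List.pySetD (List.replicate G.length (-1 : Int)) s 0).count (-1) : Int)
      = (G.length : Int) - 1 := by
    have e := count_pySetD (List.replicate G.length (-1)) 0 hsr' hold (-1)
    rw [if_pos rfl, if_neg (by omega), List.count_replicate_self] at e
    omega
  have h := pvMain G G.length rfl
    (fun row hr v hv => ⟨(hrows row hr v hv).1, (hrows row hr v hv).2⟩)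
    (G.length + 1) G.length [s]
    (PySem.List.pySetD (List.replicate G.length (-1 : Int)) s 0) 0 0 1
    hlen0
    (fun u hu => by
      rcases List.mem_singleton.mp hu with rfl
      exact ⟨hsr, by rw [hget0]; norm_num⟩)
    (fun d hd => by
      rw [pySetD_eq_set _ s 0 j (by rw [hrl]; exact hj)] at hd
      rcases List.mem_or_eq_of_mem_set hd with hmm | hmm
      · rw [List.eq_of_mem_replicate hmm]; omega
      · omega)
    (fun k hk0 hk1 => by
      have hk : k = 0 := by omega
      subst hk
      have hm := PySem.List.pyGetD_mem
        (PySem.List.pySetD (List.replicate G.length (-1 : Int)) s 0) (i := s) 0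
        (by rw [hlen0]; exact hsr)
      rwa [hget0] at hm)
    (by omega) (by omega) (by omega) (by simp only [List.length_singleton, Nat.cast_one]; omega)
  simp only [List.length_singleton, Nat.cast_one] at h
  show pvLoopA G (G.length + 1) [s]
      (PySem.List.pySetD (List.replicate G.length false) s true) 0 0 1 1
    = pvScanB (PySem.Dict.counter (pvBfsB G G.length [s]
        (PySem.List.pySetD (List.replicate G.length (-1 : Int)) s 0)))
        (PySem.List.pyRange 1 (G.length : Int) 1) 0 0
  rw [hvis]
  exact h

-- ===== VERDICT (by name: the statement is the Claim_ definition above) =====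
theorem messages_spec : Claim_equal_messages := by
  intro G s _ hpre
  exact messages_eq G s hpre
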